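-- pv_equiv track=rewrite | github.com/Fondamenti18/fondamenti-di-programmazione | students/1823149/homework04/program01.py | genera
-- ===== SOURCE A (Python) =====
-- def genera(radice,diz):
--     ret=dict()
--     if radice in diz.keys():
--         ret[radice]=diz[radice]
--         for i in diz[radice]:
--             diz2=genera(i,diz)
--             for i in diz2.keys():
--                 ret[i]=diz[i]
--     return ret
-- ===== SOURCE B (Python) =====
-- def genera(radice, diz):
--     # Memoized top-down computation of the reachable-key order, then one dict build.
--     memo = {}
--
--     def order(u):
--         if u not in diz:
--             return []
--         if u in memo:
--             return memo[u]
--         res = [u]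
--         for c in diz[u]:
--             for k in order(c):
--                 if k not in res:
--                     res.append(k)
--         memo[u] = res
--         return res
--
--     return {k: diz[k] for k in order(radice)}
-- ===== Notes on version B (the rewrite author's own statement) =====
-- stated objective: alternative
-- what changed: B replaces A's naive recursion, which recomputes every child's whole subtree dictionary on each visit, by a memoized top-down computation of each node's reachable-key order (dynamic programming with a per-node cache), building the result dict once at the end.
import Mathlib
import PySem

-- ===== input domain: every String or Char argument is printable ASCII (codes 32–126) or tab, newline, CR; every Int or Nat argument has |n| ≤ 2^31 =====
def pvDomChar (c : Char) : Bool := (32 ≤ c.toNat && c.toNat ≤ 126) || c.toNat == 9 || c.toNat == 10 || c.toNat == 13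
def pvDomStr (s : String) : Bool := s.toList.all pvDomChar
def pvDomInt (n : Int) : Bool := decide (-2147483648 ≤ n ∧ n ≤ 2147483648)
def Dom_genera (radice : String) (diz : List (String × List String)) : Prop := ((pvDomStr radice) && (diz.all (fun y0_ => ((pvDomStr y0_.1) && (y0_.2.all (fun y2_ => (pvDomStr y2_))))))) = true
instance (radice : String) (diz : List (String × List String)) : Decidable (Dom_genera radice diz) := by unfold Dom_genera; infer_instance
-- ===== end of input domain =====

-- B is a memoized (dynamic-programming) re-implementation: it computes each node's reachable-key
-- order once, caching it, instead of A's naive recursion that recomputes shared subtrees.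

-- ===== PORT A =====
-- diz is Python dict: lookup = first match in the association list
def pvGet (diz : List (String × List String)) (u : String) : Option (List String) :=
  (PySem.Dict.mk diz).get? u

-- diz[u]; in both programs this is only evaluated on keys of diz, so getD [] is exact
def pvVal (diz : List (String × List String)) (u : String) : List String :=
  (pvGet diz u).getD []

-- recursion via fuel; diz.length + 1 levels suffice on every input admitted by Pre_genera
def generaAux (diz : List (String × List String)) : Nat → String → PySem.Dict String (List String)
  | 0, _ => PySem.Dict.mk []
  | f+1, radice =>
    match pvGet diz radice with
    | none => PySem.Dict.mk []
    | some cs =>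
      cs.foldl (fun ret c =>
          (PySem.Dict.keys (generaAux diz f c)).foldl
            (fun ret i => PySem.Dict.insert ret i (pvVal diz i)) ret)
        (PySem.Dict.insert (PySem.Dict.mk []) radice cs)

def genera (radice : String) (diz : List (String × List String)) : List (String × List String) :=
  (generaAux diz (diz.length + 1) radice).items

-- ===== PORT B =====
-- order(u) with the memo dict threaded through; fuel as for A
def ordAux (diz : List (String × List String)) :
    Nat → PySem.Dict String (List String) → String → List String × PySem.Dict String (List String)
  | 0, memo, _ => ([], memo)
  | f+1, memo, u =>
    match pvGet diz u with
    | none => ([], memo)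
    | some cs =>
      match (PySem.Dict.get? memo u) with
      | some r => (r, memo)
      | none =>
        let p := cs.foldl (fun (p : List String × PySem.Dict String (List String)) c =>
            let q := ordAux diz f p.2 c
            (q.1.foldl (fun res k => if k ∈ res then res else res ++ [k]) p.1, q.2))
          ([u], memo)
        (p.1, PySem.Dict.insert p.2 u p.1)

def genera_alt (radice : String) (diz : List (String × List String)) : List (String × List String) :=
  let ks := (ordAux diz (diz.length + 1) (PySem.Dict.mk []) radice).1
  (ks.foldl (fun d k => PySem.Dict.insert d k (pvVal diz k)) (PySem.Dict.mk [])).items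

-- ===== PRECONDITION & SPEC =====
-- children of u that are themselves keys (the edges both programs recurse through)
def childrenK (diz : List (String × List String)) (u : String) : List String :=
  (pvVal diz u).filter (fun c => (pvGet diz c).isSome)

-- one reachability expansion step (keeps the set duplicate-free)
def pvStep (diz : List (String × List String)) (S : List String) : List String :=
  PySem.Set.update S (S.flatMap (childrenK diz))

def pvIter (diz : List (String × List String)) : Nat → List String → List String
  | 0, S => S
  | n+1, S => pvIter diz n (pvStep diz S)

-- nodes reachable from the seed set (diz.length + 1 expansions reach the fixpoint)
def pvReach (diz : List (String × List String)) (S : List String) : List String :=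
  pvIter diz (diz.length + 1) S

-- Pre_: no key reachable from radice lies on a cycle; on exactly such inputs Python A's
-- unbounded recursion raises RecursionError, otherwise A returns normally.
def Pre_genera (radice : String) (diz : List (String × List String)) : Prop :=
  ∀ u ∈ pvReach diz [radice], u ∉ pvReach diz (PySem.Set.ofList (childrenK diz u))

instance (radice : String) (diz : List (String × List String)) : Decidable (Pre_genera radice diz) := by
  unfold Pre_genera; infer_instance

def pvWitness_genera : String × (List (String × List String)) := ("a", [("a", ["b"]), ("b", [])])

def Spec_genera (radice : String) (diz : List (String × List String)) (out : List (String × List String)) : Prop := out = genera_alt radice diz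
instance (radice : String) (diz : List (String × List String)) (out : List (String × List String)) : Decidable (Spec_genera radice diz out) := by unfold Spec_genera; infer_instance

-- ===== CLAIM (what is proved, stated in full; the proofs are below) =====
def Claim_equal_genera : Prop := ∀ (radice : String) (diz : List (String × List String)), Dom_genera radice diz → Pre_genera radice diz → Spec_genera radice diz (genera radice diz)

-- ===== LEMMAS AND PROOFS =====

-- append k if not already present (the dedup step both sides share)
def mstep (res : List String) (k : String) : List String := if k ∈ res then res else res ++ [k]

-- specification of the key order: KS f u = (order of keys A inserts, fuel-sufficient flag)
def KS (diz : List (String × List String)) : Nat → String → List String × Bool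
  | 0, _ => ([], false)
  | f+1, u =>
    match pvGet diz u with
    | none => ([], true)
    | some cs =>
      cs.foldl (fun p c =>
          ((KS diz f c).1.foldl mstep p.1, p.2 && (KS diz f c).2)) ([u], true)

def fkd (diz : List (String × List String)) (k : String) : String × List String := (k, pvVal diz k)

theorem mstep_nodup (res : List String) (k : String) (h : res.Nodup) : (mstep res k).Nodup := by
  unfold mstep; split
  · exact h
  · rename_i hk
    simpa [List.nodup_append] using ⟨h, fun a ha hak => hk (hak ▸ ha)⟩

theorem foldl_mstep_nodup (ks : List String) : ∀ res : List String, res.Nodup → (ks.foldl mstep res).Nodup := by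
  induction ks with
  | nil => intro res h; simpa using h
  | cons k ks ih => intro res h; exact ih _ (mstep_nodup _ _ h)

theorem KS_fold_nodup (diz : List (String × List String)) (f : Nat) (cs : List String) :
    ∀ p : List String × Bool, p.1.Nodup →
      (cs.foldl (fun p c => ((KS diz f c).1.foldl mstep p.1, p.2 && (KS diz f c).2)) p).1.Nodup := by
  induction cs with
  | nil => intro p h; simpa using h
  | cons c cs ih => intro p h; exact ih _ (foldl_mstep_nodup _ _ h)

theorem KS_nodup (diz : List (String × List String)) (f : Nat) (u : String) : (KS diz f u).1.Nodup := by
  cases f with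
  | zero => simp [KS]
  | succ f =>
    simp only [KS]
    cases pvGet diz u with
    | none => simp
    | some cs => exact KS_fold_nodup diz f cs ([u], true) (by simp)

theorem keys_of_items {diz : List (String × List String)} {d : PySem.Dict String (List String)}
    {acc : List String} (h : d.items = acc.map (fkd diz)) : PySem.Dict.keys d = acc := by
  simp only [PySem.Dict.keys, h, List.map_map]
  exact (List.map_congr_left (fun a _ => rfl)).trans (List.map_id acc)

theorem insert_fkd (diz : List (String × List String)) (i : String)
    (d : PySem.Dict String (List String)) (acc : List String)
    (h : d.items = acc.map (fkd diz)) :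
    (PySem.Dict.insert d i (pvVal diz i)).items = (mstep acc i).map (fkd diz) := by
  have hkeys : PySem.Dict.keys d = acc := keys_of_items h
  have hcont : PySem.Dict.contains d i = decide (i ∈ acc) := by
    rw [PySem.Dict.contains_eq_decide_mem_keys, hkeys]
  by_cases hi : i ∈ acc
  · have : PySem.Dict.contains d i = true := by simp [hcont, hi]
    rw [PySem.Dict.items_insert_of_contains _ _ this, h, List.map_map]
    have : (mstep acc i) = acc := by simp [mstep, hi]
    rw [this]
    apply List.map_congr_left
    intro a _
    by_cases hai : a = i
    · subst hai; simp [fkd]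
    · simp [fkd, Function.comp, hai]
  · have : PySem.Dict.contains d i = false := by simp [hcont, hi]
    rw [PySem.Dict.items_insert_of_not_contains _ _ this, h]
    simp [mstep, hi, fkd]

theorem foldl_insert_fkd (diz : List (String × List String)) (ks : List String) :
    ∀ (d : PySem.Dict String (List String)) (acc : List String),
      d.items = acc.map (fkd diz) →
      (ks.foldl (fun d k => PySem.Dict.insert d k (pvVal diz k)) d).items
        = (ks.foldl mstep acc).map (fkd diz) := by
  induction ks with
  | nil => intro d acc h; simpa using h
  | cons k ks ih => intro d acc h; exact ih _ _ (insert_fkd diz k d acc h)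

theorem generaAux_items (diz : List (String × List String)) (f : Nat) (u : String) :
    (generaAux diz f u).items = ((KS diz f u).1).map (fkd diz) := by
  induction f generalizing u with
  | zero => simp [generaAux, KS]
  | succ f ih =>
    simp only [generaAux, KS]
    cases hu : pvGet diz u with
    | none => simp
    | some cs =>
      simp only []
      have hinit : (PySem.Dict.insert (PySem.Dict.mk []) u cs).items = [u].map (fkd diz) := by
        rw [PySem.Dict.items_insert_of_not_contains]
        · simp [fkd, pvVal, hu]
        · simp [PySem.Dict.contains_mk]
      have main : ∀ (cs' : List String) (d : PySem.Dict String (List String)) (p : List String × Bool),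
          d.items = p.1.map (fkd diz) →
          (cs'.foldl (fun ret c =>
              (PySem.Dict.keys (generaAux diz f c)).foldl
                (fun ret i => PySem.Dict.insert ret i (pvVal diz i)) ret) d).items
            = ((cs'.foldl (fun p c => ((KS diz f c).1.foldl mstep p.1, p.2 && (KS diz f c).2)) p).1).map (fkd diz) := by
        intro cs'
        induction cs' with
        | nil => intro d p h; simpa using h
        | cons c cs' ihc =>
          intro d p h
          have hk : PySem.Dict.keys (generaAux diz f c) = (KS diz f c).1 := keys_of_items (ih c)
          refine ihc _ ((KS diz f c).1.foldl mstep p.1, p.2 && (KS diz f c).2) ?_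
          show ((PySem.Dict.keys (generaAux diz f c)).foldl
              (fun ret i => PySem.Dict.insert ret i (pvVal diz i)) d).items
            = ((KS diz f c).1.foldl mstep p.1).map (fkd diz)
          rw [hk]
          exact foldl_insert_fkd diz _ _ _ h
      exact main cs _ ([u], true) hinit

theorem KS_flag_fold (diz : List (String × List String)) (f : Nat) (cs : List String) :
    ∀ p : List String × Bool,
      (cs.foldl (fun p c => ((KS diz f c).1.foldl mstep p.1, p.2 && (KS diz f c).2)) p).2
        = (p.2 && cs.all (fun c => (KS diz f c).2)) := by
  induction cs with
  | nil => intro p; simp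
  | cons c cs ih =>
    intro p
    rw [List.foldl_cons, ih]
    simp [Bool.and_assoc]

theorem KS_stable (diz : List (String × List String)) (f : Nat) :
    ∀ u g, f ≤ g → (KS diz f u).2 = true → KS diz g u = KS diz f u := by
  induction f with
  | zero => intro u g _ hfl; simp [KS] at hfl
  | succ f ih =>
    intro u g hg hfl
    cases g with
    | zero => omega
    | succ g =>
      have hg' : f ≤ g := by omega
      simp only [KS] at hfl ⊢
      cases hu : pvGet diz u with
      | none => rfl
      | some cs =>
        rw [hu] at hfl
        simp only [] at hfl ⊢
        have inner : ∀ (cs' : List String) (p : List String × Bool),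
            (cs'.foldl (fun p c => ((KS diz f c).1.foldl mstep p.1, p.2 && (KS diz f c).2)) p).2 = true →
            cs'.foldl (fun p c => ((KS diz g c).1.foldl mstep p.1, p.2 && (KS diz g c).2)) p
              = cs'.foldl (fun p c => ((KS diz f c).1.foldl mstep p.1, p.2 && (KS diz f c).2)) p := by
          intro cs'
          induction cs' with
          | nil => intro p _; rfl
          | cons c cs' ihc =>
            intro p htot
            rw [List.foldl_cons] at htot
            have hflag : ((KS diz f c).1.foldl mstep p.1, p.2 && (KS diz f c).2).2 = true := by
              rw [KS_flag_fold] at htot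
              exact (Bool.and_elim_left htot)
            have hc : (KS diz f c).2 = true := by
              simpa using (Bool.and_elim_right (by simpa using hflag))
            have hcs : KS diz g c = KS diz f c := ih c g hg' hc
            rw [List.foldl_cons, List.foldl_cons, hcs]
            exact ihc _ htot
        exact inner cs ([u], true) hfl

def InvM (diz : List (String × List String)) (memo : PySem.Dict String (List String)) : Prop :=
  ∀ p ∈ memo.items, ∃ h, KS diz h p.1 = (p.2, true)

theorem ordAux_main (diz : List (String × List String)) (f : Nat) :
    ∀ u memo, InvM diz memo → (KS diz f u).2 = true →
      (ordAux diz f memo u).1 = (KS diz f u).1 ∧ InvM diz (ordAux diz f memo u).2 := by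
  induction f with
  | zero => intro u memo _ hfl; simp [KS] at hfl
  | succ f ih =>
    intro u memo hinv hfl
    simp only [KS] at hfl ⊢
    simp only [ordAux]
    cases hu : pvGet diz u with
    | none => exact ⟨by simp, by simpa using hinv⟩
    | some cs =>
      rw [hu] at hfl
      simp only [] at hfl ⊢
      cases hm : PySem.Dict.get? memo u with
      | some r =>
        simp only []
        have hmem : (u, r) ∈ memo.items := PySem.Dict.mem_items_of_get?_eq_some _ hm
        obtain ⟨h, hh⟩ := hinv (u, r) hmem
        -- both KS (f+1) u and KS h u carry a true flag: stabilize at max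
        have hfl' : (KS diz (f+1) u).2 = true := by simp only [KS]; rw [hu]; exact hfl
        have h1 : KS diz (max (f+1) h) u = KS diz (f+1) u :=
          KS_stable diz (f+1) u _ (Nat.le_max_left _ _) hfl'
        have h2 : KS diz (max (f+1) h) u = KS diz h u :=
          KS_stable diz h u _ (Nat.le_max_right _ _) (by rw [hh])
        have : (KS diz (f+1) u).1 = r := by
          rw [← h1, h2, hh]
        constructor
        · rw [this.symm]
          simp only [KS]; rw [hu]
        · exact hinv
      | none =>
        simp only []
        have inner : ∀ (cs' : List String) (res : List String)
            (memo' : PySem.Dict String (List String)) (b : Bool),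
            InvM diz memo' →
            (cs'.foldl (fun p c => ((KS diz f c).1.foldl mstep p.1, p.2 && (KS diz f c).2)) (res, b)).2 = true →
            (cs'.foldl (fun (p : List String × PySem.Dict String (List String)) c =>
                ((ordAux diz f p.2 c).1.foldl (fun res k => if k ∈ res then res else res ++ [k]) p.1,
                 (ordAux diz f p.2 c).2)) (res, memo')).1
              = (cs'.foldl (fun p c => ((KS diz f c).1.foldl mstep p.1, p.2 && (KS diz f c).2)) (res, b)).1
            ∧ InvM diz (cs'.foldl (fun (p : List String × PySem.Dict String (List String)) c =>
                ((ordAux diz f p.2 c).1.foldl (fun res k => if k ∈ res then res else res ++ [k]) p.1,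
                 (ordAux diz f p.2 c).2)) (res, memo')).2 := by
          intro cs'
          induction cs' with
          | nil => intro res memo' b hinv' _; exact ⟨rfl, hinv'⟩
          | cons c cs' ihc =>
            intro res memo' b hinv' htot
            rw [List.foldl_cons] at htot
            have hc : (KS diz f c).2 = true := by
              rw [KS_flag_fold] at htot
              simpa using (Bool.and_elim_right (by simpa using (Bool.and_elim_left htot)))
            obtain ⟨hq1, hq2⟩ := ih c memo' hinv' hc
            rw [List.foldl_cons, List.foldl_cons]
            have hstep : ((ordAux diz f memo' c).1.foldl (fun res k => if k ∈ res then res else res ++ [k]) res,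
                (ordAux diz f memo' c).2)
                = (((KS diz f c).1.foldl mstep res : List String), (ordAux diz f memo' c).2) := by
              rw [hq1]; rfl
            rw [hstep]
            exact ihc _ _ _ hq2 htot
        obtain ⟨hres, hinv2⟩ := inner cs [u] memo true hinv hfl
        constructor
        · exact hres
        · intro p hp
          rcases (PySem.Dict.mem_items_insert _ _ _ _).1 hp with heq | ⟨hmem, _⟩
          · refine ⟨f + 1, ?_⟩
            have : (KS diz (f+1) u).1 = (cs.foldl (fun p c => ((KS diz f c).1.foldl mstep p.1, p.2 && (KS diz f c).2)) ([u], true)).1 := by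
              simp only [KS]; rw [hu]
            rw [heq]
            simp only []
            apply Prod.ext
            · simp only []
              rw [hres, ← this]
            · simp only [KS]; rw [hu]; exact hfl
          · exact hinv2 p hmem

-- ---- reachability machinery for the fuel-adequacy proof ----

theorem mem_pvStep {diz : List (String × List String)} {S : List String} {y : String} :
    y ∈ pvStep diz S ↔ y ∈ S ∨ ∃ u ∈ S, y ∈ childrenK diz u := by
  unfold pvStep
  rw [PySem.Set.mem_update]
  simp [List.mem_flatMap]

theorem pvStep_nodup {diz : List (String × List String)} {S : List String} (h : S.Nodup) :
    (pvStep diz S).Nodup := PySem.Set.nodup_update _ _ h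

theorem subset_pvStep {diz : List (String × List String)} (S : List String) : S ⊆ pvStep diz S :=
  fun _ hy => mem_pvStep.2 (Or.inl hy)

theorem subset_pvIter (diz : List (String × List String)) (n : Nat) :
    ∀ S : List String, S ⊆ pvIter diz n S := by
  induction n with
  | zero => intro S; simp [pvIter]
  | succ n ih => intro S; exact fun y hy => ih (pvStep diz S) (subset_pvStep S hy)

theorem childrenK_mem_keys {diz : List (String × List String)} {u c : String}
    (h : c ∈ childrenK diz u) : c ∈ diz.map (·.1) := by
  unfold childrenK at h
  have hsome : (pvGet diz c).isSome := (List.mem_filter.1 h).2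
  unfold pvGet at hsome
  by_contra hmem
  have : (PySem.Dict.mk diz).get? c = none := by
    rw [PySem.Dict.get?_eq_none_iff_not_mem_keys]
    simpa [PySem.Dict.keys] using hmem
  rw [this] at hsome
  simp at hsome

theorem pvIter_of_fix (diz : List (String × List String)) (n : Nat) (S : List String)
    (h : pvStep diz S = S) : pvIter diz n S = S := by
  induction n with
  | zero => rfl
  | succ n ih => show pvIter diz n (pvStep diz S) = S; rw [h]; exact ih

theorem pvIter_fix (diz : List (String × List String)) (Ball : List String)
    (_hBall : Ball.Nodup) (hB : ∀ u c, c ∈ childrenK diz u → c ∈ Ball) (n : Nat) :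
    ∀ S : List String, S.Nodup → (∀ x ∈ S, x ∈ Ball) → Ball.length ≤ S.length + n →
      pvStep diz (pvIter diz n S) = pvIter diz n S := by
  induction n with
  | zero =>
    intro S hS hSB hlen
    simp only [pvIter]
    have hsub : S.Subperm Ball := List.subperm_of_subset hS hSB
    have hperm : S.Perm Ball := hsub.perm_of_length_le (by omega)
    have hBS : ∀ x ∈ Ball, x ∈ S := fun x hx => hperm.symm.subset hx
    unfold pvStep
    rw [PySem.Set.update_eq_append_filter]
    have : List.filter (fun y => !PySem.Set.contains S y) (PySem.Set.ofList (S.flatMap (childrenK diz))) = [] := by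
      rw [List.filter_eq_nil_iff]
      intro a ha
      rcases List.mem_flatMap.1 ((PySem.Set.mem_ofList _ _).1 ha) with ⟨u, _, hc⟩
      have : a ∈ S := hBS a (hB u a hc)
      simpa using this
    rw [this, List.append_nil]
  | succ n ih =>
    intro S hS hSB hlen
    by_cases hfix : pvStep diz S = S
    · have h1 : pvIter diz (n+1) S = S := pvIter_of_fix diz (n+1) S hfix
      rw [h1, hfix]
    · have hform : ∃ t, pvStep diz S = S ++ t := by
        unfold pvStep
        rw [PySem.Set.update_eq_append_filter]
        exact ⟨_, rfl⟩
      obtain ⟨t, ht⟩ := hform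
      have htne : t ≠ [] := by
        intro h0; apply hfix; rw [ht, h0, List.append_nil]
      have hlen' : S.length + 1 ≤ (pvStep diz S).length := by
        rw [ht, List.length_append]
        cases t with
        | nil => exact absurd rfl htne
        | cons a t => simp
      show pvStep diz (pvIter diz n (pvStep diz S)) = pvIter diz n (pvStep diz S)
      refine ih (pvStep diz S) (pvStep_nodup hS) ?_ (by omega)
      intro x hx
      rcases mem_pvStep.1 hx with hx | ⟨u, _, hc⟩
      · exact hSB x hx
      · exact hB u x hc

-- Ball for a seed S₀: the seed together with all keys of diz, deduplicated
theorem pvReach_closed (diz : List (String × List String)) (S : List String) (hS : S.Nodup)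
    {u c : String} (hu : u ∈ pvReach diz S) (hc : c ∈ childrenK diz u) :
    c ∈ pvReach diz S := by
  have hfix : pvStep diz (pvReach diz S) = pvReach diz S := by
    apply pvIter_fix diz (PySem.Set.ofList (S ++ diz.map (·.1)))
      (PySem.Set.nodup_ofList _)
      (fun u c hc => (PySem.Set.mem_ofList _ _).2 (List.mem_append.2 (Or.inr (childrenK_mem_keys hc))))
      (diz.length + 1) S hS
      (fun x hx => (PySem.Set.mem_ofList _ _).2 (List.mem_append.2 (Or.inl hx)))
    calc (PySem.Set.ofList (S ++ diz.map (·.1))).length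
        ≤ (S ++ diz.map (·.1)).length := PySem.Set.length_ofList_le _
      _ = S.length + diz.length := by simp
      _ ≤ S.length + (diz.length + 1) := by omega
  rw [← hfix]
  exact mem_pvStep.2 (Or.inr ⟨u, hu, hc⟩)

theorem KS_ok_gen (radice : String) (diz : List (String × List String))
    (hPre : Pre_genera radice diz) (f : Nat) :
    ∀ (V : List String) (u : String),
      u ∈ pvReach diz [radice] → V.Nodup → (∀ v ∈ V, v ∈ diz.map (·.1)) →
      (∀ v ∈ V, u ∈ pvReach diz (PySem.Set.ofList (childrenK diz v))) →
      (PySem.Set.ofList (diz.map (·.1))).length + 1 ≤ f + V.length →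
      (KS diz f u).2 = true := by
  have hVlen : ∀ V : List String, V.Nodup → (∀ v ∈ V, v ∈ diz.map (·.1)) →
      V.length ≤ (PySem.Set.ofList (diz.map (·.1))).length := by
    intro V hnd hsub
    have : V.Subperm (PySem.Set.ofList (diz.map (·.1))) :=
      List.subperm_of_subset hnd (fun v hv => (PySem.Set.mem_ofList _ _).2 (hsub v hv))
    exact this.length_le
  induction f with
  | zero =>
    intro V u _ hnd hsub _ hlen
    have := hVlen V hnd hsub
    omega
  | succ f ih =>
    intro V u hu hnd hsub hanc hlen
    simp only [KS]
    cases hgu : pvGet diz u with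
    | none => rfl
    | some cs =>
      simp only []
      rw [KS_flag_fold]
      rw [Bool.true_and, List.all_eq_true]
      intro c hc
      -- u is a key, and u ∉ V (else Pre_genera is violated at u)
      have hukey : u ∈ diz.map (·.1) := by
        by_contra hmem
        have : (PySem.Dict.mk diz).get? u = none := by
          rw [PySem.Dict.get?_eq_none_iff_not_mem_keys]
          simpa [PySem.Dict.keys] using hmem
        unfold pvGet at hgu
        rw [this] at hgu
        simp at hgu
      have huV : u ∉ V := by
        intro huv
        exact hPre u hu (hanc u huv)
      have hnd' : (V ++ [u]).Nodup := by
        rw [List.nodup_append]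
        refine ⟨hnd, List.nodup_singleton u, ?_⟩
        intro a ha b hb
        simp only [List.mem_singleton] at hb
        subst hb
        exact fun h => huV (h ▸ ha)
      have hsub' : ∀ v ∈ V ++ [u], v ∈ diz.map (·.1) := by
        intro v hv
        rcases List.mem_append.1 hv with hv | hv
        · exact hsub v hv
        · simp at hv; exact hv ▸ hukey
      have hVu : (V ++ [u]).length ≤ (PySem.Set.ofList (diz.map (·.1))).length :=
        hVlen _ hnd' hsub'
      cases hgc : pvGet diz c with
      | none =>
        cases f with
        | zero => simp at hVu; omega
        | succ f' => simp [KS, hgc]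
      | some ds =>
        -- c is a key child of u
        have hck : c ∈ childrenK diz u := by
          unfold childrenK
          rw [List.mem_filter]
          refine ⟨by simpa [pvVal, hgu] using hc, by simp [hgc]⟩
        refine ih (V ++ [u]) c ?_ hnd' hsub' ?_ ?_
        · exact pvReach_closed diz [radice] (by simp) hu hck
        · intro v hv
          rcases List.mem_append.1 hv with hv | hv
          · exact pvReach_closed diz _ (PySem.Set.nodup_ofList _) (hanc v hv) hck
          · simp at hv
            subst hv
            exact subset_pvIter diz _ _ ((PySem.Set.mem_ofList _ _).2 hck)
        · simp at hVu ⊢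
          omega

theorem KS_ok (radice : String) (diz : List (String × List String)) (hPre : Pre_genera radice diz) :
    (KS diz (diz.length + 1) radice).2 = true := by
  refine KS_ok_gen radice diz hPre (diz.length + 1) [] radice ?_ (by simp) (by simp) (by simp) ?_
  · exact subset_pvIter diz _ _ (by simp)
  · have h1 : (PySem.Set.ofList (diz.map (·.1))).length ≤ (diz.map (·.1)).length :=
      PySem.Set.length_ofList_le _
    simp at h1 ⊢
    omega

theorem foldl_mstep_fresh (ks : List String) :
    ∀ res : List String, ks.Nodup → (∀ k ∈ ks, k ∉ res) → ks.foldl mstep res = res ++ ks := by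
  induction ks with
  | nil => intro res _ _; simp
  | cons k ks ih =>
    intro res hnd hdisj
    rw [List.foldl_cons]
    have hk : k ∉ res := hdisj k (by simp)
    have : mstep res k = res ++ [k] := by simp [mstep, hk]
    rw [this, ih (res ++ [k]) hnd.of_cons]
    · simp
    · intro a ha
      simp only [List.mem_append, List.mem_singleton]
      rintro (h | h)
      · exact hdisj a (by simp [ha]) h
      · exact (List.nodup_cons.1 hnd).1 (h ▸ ha)

-- ===== VERDICT (by name: the statement is the Claim_ definition above) =====
theorem genera_spec : Claim_equal_genera := by
  intro radice diz _ hpre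
  unfold Spec_genera
  have hinv : InvM diz (PySem.Dict.mk []) := by
    intro p hp
    simp at hp
  obtain ⟨h1, -⟩ :=
    ordAux_main diz (diz.length + 1) radice (PySem.Dict.mk []) hinv (KS_ok radice diz hpre)
  show (generaAux diz (diz.length + 1) radice).items
      = (((ordAux diz (diz.length + 1) (PySem.Dict.mk []) radice).1).foldl
          (fun d k => PySem.Dict.insert d k (pvVal diz k)) (PySem.Dict.mk [])).items
  rw [generaAux_items, foldl_insert_fkd diz _ _ [] rfl, h1,
    foldl_mstep_fresh _ [] (KS_nodup diz _ radice) (by simp), List.nil_append]
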